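-- pv_equiv track=rewrite | github.com/A-Garcia0510/pruebas-ds | src/loyalty/services/loyalty_engine.py | _calculate_transaction_summary
-- ===== SOURCE A (Python) =====
-- from typing import Dict, List, Optional, Any
--
-- def _calculate_transaction_summary(transactions: List[Dict[str, Any]]) -> Dict[str, Any]:
--     """Calcular resumen de transacciones"""
--     total_earned = sum(t['points_amount'] for t in transactions if t['points_amount'] > 0)
--     total_redeemed = abs(sum(t['points_amount'] for t in transactions if t['points_amount'] < 0))
--     net_points = total_earned - total_redeemed
--
--     return {
--         'total_earned': total_earned,
--         'total_redeemed': total_redeemed,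
--         'net_points': net_points,
--         'total_transactions': len(transactions)
--     }
-- ===== SOURCE B (Python) =====
-- def _calculate_transaction_summary(transactions):
--     """Calcular resumen de transacciones"""
--     pts = [t['points_amount'] for t in transactions]
--     s = sum(pts)
--     a = sum(map(abs, pts))
--     return {
--         'total_earned': (a + s) // 2,
--         'total_redeemed': (a - s) // 2,
--         'net_points': s,
--         'total_transactions': len(pts)
--     }
-- ===== Notes on version B (the rewrite author's own statement) =====
-- stated objective: alternative
-- what changed: Instead of A's two sign-filtered generator-sums plus abs, B sums all points (s) and all absolute values (a) with no filtering or branching and recovers earned/redeemed by the algebraic identity earned=(a+s)/2, redeemed=(a-s)/2, net=s.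
import Mathlib
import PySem

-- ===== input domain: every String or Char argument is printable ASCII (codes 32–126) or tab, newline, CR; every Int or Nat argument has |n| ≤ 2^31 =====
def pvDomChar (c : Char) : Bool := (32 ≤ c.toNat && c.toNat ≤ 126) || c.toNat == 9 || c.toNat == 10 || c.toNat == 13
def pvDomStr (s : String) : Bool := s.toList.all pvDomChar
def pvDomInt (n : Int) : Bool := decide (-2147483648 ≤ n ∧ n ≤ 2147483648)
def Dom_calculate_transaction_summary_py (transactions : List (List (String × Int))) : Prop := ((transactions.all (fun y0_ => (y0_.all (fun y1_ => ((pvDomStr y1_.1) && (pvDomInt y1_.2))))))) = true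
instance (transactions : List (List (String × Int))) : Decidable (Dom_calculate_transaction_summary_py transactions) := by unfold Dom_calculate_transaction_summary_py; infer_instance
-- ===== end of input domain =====

-- B replaces A's two sign-filtered generator-sums plus abs by the algebraic identity
-- earned = (sum|p| + sum p)/2, redeemed = (sum|p| - sum p)/2, net = sum p; return value only.

-- t['points_amount'] (first match in the assoc list; Pre_ guarantees the key is present,
-- so the getD default is never reached inside Pre_)
def pvPA (t : List (String × Int)) : Int := ((t.find? (fun kv => kv.1 == "points_amount")).map Prod.snd).getD 0

-- ===== PORT A =====
def calculate_transaction_summary_py (transactions : List (List (String × Int))) : List (String × Int) :=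
  let total_earned := (transactions.filter (fun t => pvPA t > 0)).foldl (fun s t => s + pvPA t) 0
  let total_redeemed := |(transactions.filter (fun t => pvPA t < 0)).foldl (fun s t => s + pvPA t) 0|
  let net_points := total_earned - total_redeemed
  [("total_earned", total_earned), ("total_redeemed", total_redeemed),
   ("net_points", net_points), ("total_transactions", (transactions.length : Int))]

-- ===== PORT B =====
def calculate_transaction_summary_py_alt (transactions : List (List (String × Int))) : List (String × Int) :=
  let pts := transactions.map pvPA
  let s := pts.foldl (fun acc x => acc + x) 0
  let a := (pts.map (fun x => |x|)).foldl (fun acc x => acc + x) 0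
  [("total_earned", PySem.Int.floordiv (a + s) 2),
   ("total_redeemed", PySem.Int.floordiv (a - s) 2),
   ("net_points", s), ("total_transactions", (pts.length : Int))]

-- ===== PRECONDITION & SPEC =====
-- Pre_ excludes transactions missing the 'points_amount' key, on which A raises KeyError.
def Pre_calculate_transaction_summary_py (transactions : List (List (String × Int))) : Prop :=
  ∀ t ∈ transactions, (t.find? (fun kv => kv.1 == "points_amount")).isSome
instance (transactions : List (List (String × Int))) : Decidable (Pre_calculate_transaction_summary_py transactions) := by unfold Pre_calculate_transaction_summary_py; infer_instance
def pvWitness_calculate_transaction_summary_py : (List (List (String × Int))) := [[("points_amount", 5)], [("points_amount", -3)]]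

def Spec_calculate_transaction_summary_py (transactions : List (List (String × Int))) (out : List (String × Int)) : Prop := out = calculate_transaction_summary_py_alt transactions
instance (transactions : List (List (String × Int))) (out : List (String × Int)) : Decidable (Spec_calculate_transaction_summary_py transactions out) := by unfold Spec_calculate_transaction_summary_py; infer_instance

-- ===== CLAIM (what is proved, stated in full; the proofs are below) =====
def Claim_equal_calculate_transaction_summary_py : Prop := ∀ (transactions : List (List (String × Int))), Dom_calculate_transaction_summary_py transactions → Pre_calculate_transaction_summary_py transactions → Spec_calculate_transaction_summary_py transactions (calculate_transaction_summary_py transactions)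

-- ===== LEMMAS AND PROOFS =====

-- shift the accumulator out of a sum-fold over ints
lemma foldl_add_shift (l : List Int) (a : Int) :
    l.foldl (fun acc x => acc + x) a = a + l.foldl (fun acc x => acc + x) 0 := by
  induction l generalizing a with
  | nil => simp
  | cons h tl ih =>
    simp only [List.foldl]
    rw [ih (a + h), ih (0 + h)]
    ring

-- sum of absolute values plus sum equals twice the positive-filtered sum
lemma abs_add_sum (l : List Int) :
    (l.map (fun x => |x|)).foldl (fun acc x => acc + x) 0 + l.foldl (fun acc x => acc + x) 0 =
    2 * (l.filter (fun x => x > 0)).foldl (fun acc x => acc + x) 0 := by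
  induction l with
  | nil => simp
  | cons h tl ih =>
    by_cases h1 : h > 0
    · have : |h| = h := abs_of_pos h1
      simp only [List.map, List.filter, List.foldl, h1,
        decide_true, this]
      rw [foldl_add_shift (tl.map (fun x => |x|)) (0 + h), foldl_add_shift tl (0 + h),
        foldl_add_shift (tl.filter (fun x => x > 0)) (0 + h)]
      omega
    · have : |h| = -h := abs_of_nonpos (by omega)
      simp only [List.map, List.filter, List.foldl, h1, decide_false, this]
      rw [foldl_add_shift (tl.map (fun x => |x|)) (0 + -h), foldl_add_shift tl (0 + h)]
      omega

-- sum of absolute values minus sum equals twice the negated negative-filtered sum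
lemma abs_sub_sum (l : List Int) :
    (l.map (fun x => |x|)).foldl (fun acc x => acc + x) 0 - l.foldl (fun acc x => acc + x) 0 =
    -2 * (l.filter (fun x => x < 0)).foldl (fun acc x => acc + x) 0 := by
  induction l with
  | nil => simp
  | cons h tl ih =>
    by_cases h1 : h < 0
    · have : |h| = -h := abs_of_neg h1
      simp only [List.map, List.filter, List.foldl, h1, decide_true, this]
      rw [foldl_add_shift (tl.map (fun x => |x|)) (0 + -h), foldl_add_shift tl (0 + h),
        foldl_add_shift (tl.filter (fun x => x < 0)) (0 + h)]
      omega
    · have : |h| = h := abs_of_nonneg (by omega)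
      simp only [List.map, List.filter, List.foldl, h1, decide_false, this]
      rw [foldl_add_shift (tl.map (fun x => |x|)) (0 + h), foldl_add_shift tl (0 + h)]
      omega

-- the negative-filtered sum is nonpositive
lemma neg_fold_nonpos (l : List Int) :
    (l.filter (fun x => x < 0)).foldl (fun acc x => acc + x) 0 ≤ 0 := by
  induction l with
  | nil => simp
  | cons h tl ih =>
    by_cases h1 : h < 0
    · simp only [List.filter, h1, decide_true, List.foldl]
      rw [foldl_add_shift]
      omega
    · simp only [List.filter, h1, decide_false]
      exact ih

-- ===== VERDICT (by name: the statement is the Claim_ definition above) =====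
theorem calculate_transaction_summary_py_spec : Claim_equal_calculate_transaction_summary_py := by
  intro ts _ _
  unfold Spec_calculate_transaction_summary_py
  unfold calculate_transaction_summary_py calculate_transaction_summary_py_alt
  simp only [List.length_map]
  -- rewrite A's transaction-level folds as folds over the mapped points list
  have hmapP : (ts.filter (fun t => pvPA t > 0)).foldl (fun s t => s + pvPA t) 0 =
      ((ts.map pvPA).filter (fun x => x > 0)).foldl (fun acc x => acc + x) 0 := by
    rw [List.filter_map, List.foldl_map]; rfl
  have hmapN : (ts.filter (fun t => pvPA t < 0)).foldl (fun s t => s + pvPA t) 0 =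
      ((ts.map pvPA).filter (fun x => x < 0)).foldl (fun acc x => acc + x) 0 := by
    rw [List.filter_map, List.foldl_map]; rfl
  set l := ts.map pvPA with hl
  have hP := abs_add_sum l
  have hN := abs_sub_sum l
  have hnp := neg_fold_nonpos l
  have habs : |(l.filter (fun x => x < 0)).foldl (fun acc x => acc + x) 0| =
      -((l.filter (fun x => x < 0)).foldl (fun acc x => acc + x) 0) := abs_of_nonpos hnp
  rw [hmapP, hmapN, habs]
  have h2 : (0:Int) < 2 := by norm_num
  rw [PySem.Int.floordiv_eq_ediv_of_pos h2, PySem.Int.floordiv_eq_ediv_of_pos h2]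
  have e1 : ((l.map (fun x => |x|)).foldl (fun acc x => acc + x) 0 + l.foldl (fun acc x => acc + x) 0) / 2
      = (l.filter (fun x => x > 0)).foldl (fun acc x => acc + x) 0 := by
    rw [hP]; exact Int.mul_ediv_cancel_left _ (by norm_num)
  have e2 : ((l.map (fun x => |x|)).foldl (fun acc x => acc + x) 0 - l.foldl (fun acc x => acc + x) 0) / 2
      = -((l.filter (fun x => x < 0)).foldl (fun acc x => acc + x) 0) := by
    rw [hN]
    have : (-2 : Int) * (l.filter (fun x => x < 0)).foldl (fun acc x => acc + x) 0
        = 2 * (-((l.filter (fun x => x < 0)).foldl (fun acc x => acc + x) 0)) := by ring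
    rw [this]; exact Int.mul_ediv_cancel_left _ (by norm_num)
  rw [e1, e2]
  -- net: earned - redeemed = sum
  have : (l.filter (fun x => x > 0)).foldl (fun acc x => acc + x) 0 -
      -((l.filter (fun x => x < 0)).foldl (fun acc x => acc + x) 0) = l.foldl (fun acc x => acc + x) 0 := by
    omega
  rw [this]
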